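-- pv_equiv track=rewrite | github.com/Basemism/stablehlo-onnx | src/utils.py | strip_loc
-- ===== SOURCE A (Python) =====
-- def strip_loc(s: str) -> str:
--     out = []
--     i = 0
--     while i < len(s):
--         if s.startswith(" loc(", i):
--             depth = 1
--             i += 5
--             while i < len(s) and depth > 0:
--                 if s[i] == '(':
--                     depth += 1
--                 elif s[i] == ')':
--                     depth -= 1
--                 i += 1
--             continue
--         out.append(s[i])
--         i += 1
--     return "".join(out)
-- ===== SOURCE B (Python) =====
-- def strip_loc(s: str) -> str:
--     # Split once on the marker; then walk the pieces with a running paren depth: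
--     # each separator " loc(" swallowed by split contributes one '(' to the depth.
--     pieces = s.split(" loc(")
--     out = [pieces[0]]
--     depth = 0
--     for p in pieces[1:]:
--         depth += 1
--         m = 0
--         while m < len(p) and depth > 0:
--             c = p[m]
--             if c == '(':
--                 depth += 1
--             elif c == ')':
--                 depth -= 1
--             m += 1
--         out.append(p[m:])
--     return "".join(out)
-- ===== Notes on version B (the rewrite author's own statement) =====
-- stated objective: faster
-- what changed: B splits the string once on the five-character marker and folds over the resulting pieces with a running parenthesis depth (each swallowed separator opens one level), appending whole kept slices, instead of A's char-by-char outer scan that tests startswith at every index and appends single characters.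
import Mathlib
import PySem

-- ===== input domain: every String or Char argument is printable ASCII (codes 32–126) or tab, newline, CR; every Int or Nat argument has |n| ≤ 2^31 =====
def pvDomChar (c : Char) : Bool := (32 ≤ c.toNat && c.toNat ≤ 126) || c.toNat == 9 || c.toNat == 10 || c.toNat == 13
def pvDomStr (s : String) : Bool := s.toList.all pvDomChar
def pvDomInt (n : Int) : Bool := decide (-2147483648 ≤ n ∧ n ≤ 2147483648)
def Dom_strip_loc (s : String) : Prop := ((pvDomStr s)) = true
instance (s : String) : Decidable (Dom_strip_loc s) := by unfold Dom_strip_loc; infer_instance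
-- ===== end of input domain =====

-- B removes balanced " loc(...)" segments by one split on the marker plus a depth fold over
-- the pieces, instead of A's per-index startswith scan; objective: alternative decomposition.

-- ===== PORT A =====

def locSep : List Char := [' ', 'l', 'o', 'c', '(']

-- A's inner while-loop: consume characters while depth > 0, adjusting depth per char.
def skipA (d : Nat) (cs : List Char) : List Char :=
  if d = 0 then cs
  else
    match cs with
    | [] => []
    | c :: r => skipA (if c = '(' then d + 1 else if c = ')' then d - 1 else d) r
termination_by cs.length

theorem skipA_length (d : Nat) (cs : List Char) : (skipA d cs).length ≤ cs.length := by
  fun_induction skipA d cs <;> simp_all <;> omega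

-- A's outer while-loop over the remaining suffix of s.
def goA (cs : List Char) : List Char :=
  if locSep.isPrefixOf cs then goA (skipA 1 (cs.drop 5))
  else
    match cs with
    | [] => []
    | c :: r => c :: goA r
termination_by cs.length
decreasing_by
  · have hp : locSep <+: cs := by simpa [List.isPrefixOf_iff_prefix] using ‹locSep.isPrefixOf cs = true›
    have h5 : 5 ≤ cs.length := by simpa [locSep] using hp.length_le
    have := skipA_length 1 (cs.drop 5)
    simp only [List.length_drop] at this
    omega
  · simp

def strip_loc (s : String) : String := String.mk (goA s.toList)

-- ===== PORT B =====

-- exact recursive form of Python's s.split(" loc("): leftmost, non-overlapping occurrences.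
def splitSep (cs : List Char) : List (List Char) :=
  if locSep.isPrefixOf cs then [] :: splitSep (cs.drop 5)
  else
    match cs with
    | [] => [[]]
    | c :: r =>
      match splitSep r with
      | [] => [[c]]
      | p :: ps => (c :: p) :: ps
termination_by cs.length
decreasing_by
  · have hp : locSep <+: cs := by simpa [List.isPrefixOf_iff_prefix] using ‹locSep.isPrefixOf cs = true›
    have h5 : 5 ≤ cs.length := by simpa [locSep] using hp.length_le
    simp; omega
  · simp

-- B's inner while-loop: returns (final depth, kept tail of the piece).
def consume (d : Nat) (cs : List Char) : Nat × List Char :=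
  if d = 0 then (0, cs)
  else
    match cs with
    | [] => (d, [])
    | c :: r => consume (if c = '(' then d + 1 else if c = ')' then d - 1 else d) r
termination_by cs.length

-- B's for-loop over the pieces after the first, with depth += 1 per separator.
def goB (d : Nat) (ps : List (List Char)) : List Char :=
  match ps with
  | [] => []
  | p :: rest =>
    let r := consume (d + 1) p
    r.2 ++ goB r.1 rest

def strip_loc_alt (s : String) : String :=
  match splitSep s.toList with
  | [] => ""
  | p :: ps => String.mk (p ++ goB 0 ps)

-- ===== PRECONDITION & SPEC =====
def Spec_strip_loc (s : String) (out : String) : Prop := out = strip_loc_alt s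
instance (s : String) (out : String) : Decidable (Spec_strip_loc s out) := by unfold Spec_strip_loc; infer_instance

-- ===== CLAIM (what is proved, stated in full; the proofs are below) =====
def Claim_equal_strip_loc : Prop := ∀ (s : String), Dom_strip_loc s → Spec_strip_loc s (strip_loc s)

-- ===== LEMMAS AND PROOFS =====

def outB (ps : List (List Char)) : List Char :=
  match ps with
  | [] => []
  | p :: rest => p ++ goB 0 rest

theorem splitSep_ne_nil (cs : List Char) : splitSep cs ≠ [] := by
  fun_induction splitSep cs <;> simp_all

theorem skipA_zero (cs : List Char) : skipA 0 cs = cs := by rw [skipA.eq_def]; simp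

theorem skipA_nil (d : Nat) (h : d ≠ 0) : skipA d [] = [] := by rw [skipA.eq_def]; simp [h]

theorem skipA_cons (d : Nat) (c : Char) (r : List Char) (h : d ≠ 0) :
    skipA d (c :: r) = skipA (if c = '(' then d + 1 else if c = ')' then d - 1 else d) r := by
  rw [skipA.eq_def]; simp [h]

theorem consume_nil (d : Nat) (h : d ≠ 0) : consume d [] = (d, []) := by rw [consume.eq_def]; simp [h]

theorem consume_cons (d : Nat) (c : Char) (r : List Char) (h : d ≠ 0) :
    consume d (c :: r) = consume (if c = '(' then d + 1 else if c = ')' then d - 1 else d) r := by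
  rw [consume.eq_def]; simp [h]

theorem consume_zero (cs : List Char) : consume 0 cs = (0, cs) := by rw [consume.eq_def]; simp

theorem skipA_sep (d : Nat) (t : List Char) (h : d ≠ 0) :
    skipA d (locSep ++ t) = skipA (d + 1) t := by
  simp only [locSep, List.cons_append, List.nil_append]
  rw [skipA_cons d ' ' _ h, if_neg (by decide : ¬ (' ' = '(')), if_neg (by decide : ¬ (' ' = ')'))]
  rw [skipA_cons d 'l' _ h, if_neg (by decide : ¬ ('l' = '(')), if_neg (by decide : ¬ ('l' = ')'))]
  rw [skipA_cons d 'o' _ h, if_neg (by decide : ¬ ('o' = '(')), if_neg (by decide : ¬ ('o' = ')'))]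
  rw [skipA_cons d 'c' _ h, if_neg (by decide : ¬ ('c' = '(')), if_neg (by decide : ¬ ('c' = ')'))]
  rw [skipA_cons d '(' _ h, if_pos rfl]

theorem main (n : Nat) : ∀ cs : List Char, cs.length ≤ n →
    (goA cs = outB (splitSep cs)) ∧
    (∀ d : Nat, 0 < d → goA (skipA d cs) = goB (d - 1) (splitSep cs)) := by
  induction n with
  | zero =>
    intro cs hle
    have hcs : cs = [] := by cases cs <;> simp_all
    subst hcs
    constructor
    · rw [goA.eq_def, splitSep]; simp [locSep, outB, goB]
    · intro d hd
      rw [skipA_nil d (by omega), goA, splitSep]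
      simp only [locSep]
      norm_num [goB]
      rw [show d - 1 + 1 = d by omega, consume_nil d (by omega)]
  | succ n ih =>
    intro cs hle
    by_cases hpre : locSep.isPrefixOf cs = true
    · have hp : locSep <+: cs := by simpa [List.isPrefixOf_iff_prefix] using hpre
      obtain ⟨t, rfl⟩ := hp
      have hdrop : (locSep ++ t).drop 5 = t := by
        have h5 : locSep.length = 5 := by simp [locSep]
        rw [← h5, List.drop_left]
      have hlt : t.length ≤ n := by
        simp only [List.length_append] at hle; simp [locSep] at hle; omega
      have iht := ih t hlt
      constructor
      · rw [goA.eq_def]; simp only [hpre, if_pos, hdrop]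
        rw [splitSep.eq_def]; simp only [hpre, if_pos, hdrop]
        rw [outB]
        have h1 := iht.2 1 (by omega)
        simpa using h1
      · intro d hd
        rw [skipA_sep d t (by omega)]
        rw [splitSep.eq_def]; simp only [hpre, if_pos, hdrop]
        rw [goB]
        rw [show d - 1 + 1 = d by omega, consume_nil d (by omega)]
        simp only [List.nil_append]
        have h2 := iht.2 (d + 1) (by omega)
        simpa using h2
    · cases cs with
      | nil =>
        constructor
        · rw [goA.eq_def, splitSep]; simp [locSep, outB, goB]
        · intro d hd
          rw [skipA_nil d (by omega), goA, splitSep]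
          simp only [locSep]
          norm_num [goB]
          rw [show d - 1 + 1 = d by omega, consume_nil d (by omega)]
      | cons c r =>
        have hr : r.length ≤ n := by simpa using hle
        have ihr := ih r hr
        obtain ⟨p, ps, hps⟩ : ∃ p ps, splitSep r = p :: ps := by
          cases h : splitSep r with
          | nil => exact absurd h (splitSep_ne_nil r)
          | cons p ps => exact ⟨p, ps, rfl⟩
        have hsplit : splitSep (c :: r) = (c :: p) :: ps := by
          rw [splitSep.eq_def]; simp only [hpre, if_neg, Bool.not_eq_true, hps]
        have hk := ihr.1
        rw [hps, outB] at hk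
        constructor
        · rw [goA.eq_def]; simp only [hpre, if_neg, Bool.not_eq_true]
          rw [hsplit, outB, hk]
          simp
        · intro d hd
          rw [skipA_cons d c r (by omega), hsplit, goB]
          rw [show d - 1 + 1 = d by omega, consume_cons d c p (by omega)]
          by_cases hu : (if c = '(' then d + 1 else if c = ')' then d - 1 else d) = 0
          · rw [hu, skipA_zero, consume_zero, hk]
          · have h3 := ihr.2 _ (Nat.pos_of_ne_zero hu)
            rw [h3, hps, goB]
            rw [show (if c = '(' then d + 1 else if c = ')' then d - 1 else d) - 1 + 1
                  = (if c = '(' then d + 1 else if c = ')' then d - 1 else d) by omega]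

-- ===== VERDICT (by name: the statement is the Claim_ definition above) =====
theorem strip_loc_spec : Claim_equal_strip_loc := by
  unfold Claim_equal_strip_loc Spec_strip_loc
  intro s _
  have h := (main s.toList.length s.toList le_rfl).1
  rw [strip_loc, strip_loc_alt, h]
  cases hs : splitSep s.toList with
  | nil => exact absurd hs (splitSep_ne_nil s.toList)
  | cons p ps => rw [outB]
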